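-- pv_equiv track=rewrite | github.com/parallel-p/play | tournament_systems/ascii_draw_tree.py | draw_tree
-- ===== SOURCE A (Python) =====
-- def draw_tree(data):
--     '''
--     Returns list of strings of the tree based on the
--     `data`. `Data` is a list with information about
--     all rounds (for more information look at the
--     unittest of olympic system).
--     '''
--     round_number = len(data)
--     tree = [''] * (2 ** round_number - 1)
--     final_tree = []
--     shift = 1  # How much cells we jump over
--     for rnum, round_id in enumerate(data):
--         idx = 0  # idx is index in round_id
--         for game in range(shift - 1, len(tree), shift * 2):
--             tree[game] = (round_id[idx], rnum)
--             idx += 1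
--         shift *= 2
--     for idx in tree:
--         separ = ' ' * 35 * idx[1]
--         player1 = separ + str(idx[0][0][0]) + ': ' + \
--                 str(idx[0][0][1]) + ' points'
--         player2 = separ + str(idx[0][1][0]) + ': ' + \
--                 str(idx[0][1][1]) + ' points'
--         game_result = player1 + '\n' + player2
--         final_tree.append(game_result)
--     return final_tree
-- ===== SOURCE B (Python) =====
-- def draw_tree(data):
--     '''
--     Returns list of strings of the tree based on the
--     `data`. Single pass: cell i (1-based) of the flat
--     bracket belongs to round l = number of trailing
--     zero bits of i, and is game j // 2 of that round.
--     '''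
--     n = len(data)
--     final_tree = []
--     for i in range(1, 2 ** n):
--         j, l = i, 0
--         while j % 2 == 0:
--             j //= 2
--             l += 1
--         game = data[l][j // 2]
--         separ = ' ' * 35 * l
--         player1 = separ + str(game[0][0]) + ': ' + str(game[0][1]) + ' points'
--         player2 = separ + str(game[1][0]) + ': ' + str(game[1][1]) + ' points'
--         final_tree.append(player1 + '\n' + player2)
--     return final_tree
-- ===== Notes on version B (the rewrite author's own statement) =====
-- stated objective: alternative
-- what changed: A allocates a 2^n-1 placeholder array, fills it round by round with strided index jumps and then formats it in a second pass; B makes a single pass over cell numbers 1..2^n-1, computing each cell's round (trailing zero bits) and game index in closed form, with no intermediate array.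
import Mathlib
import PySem

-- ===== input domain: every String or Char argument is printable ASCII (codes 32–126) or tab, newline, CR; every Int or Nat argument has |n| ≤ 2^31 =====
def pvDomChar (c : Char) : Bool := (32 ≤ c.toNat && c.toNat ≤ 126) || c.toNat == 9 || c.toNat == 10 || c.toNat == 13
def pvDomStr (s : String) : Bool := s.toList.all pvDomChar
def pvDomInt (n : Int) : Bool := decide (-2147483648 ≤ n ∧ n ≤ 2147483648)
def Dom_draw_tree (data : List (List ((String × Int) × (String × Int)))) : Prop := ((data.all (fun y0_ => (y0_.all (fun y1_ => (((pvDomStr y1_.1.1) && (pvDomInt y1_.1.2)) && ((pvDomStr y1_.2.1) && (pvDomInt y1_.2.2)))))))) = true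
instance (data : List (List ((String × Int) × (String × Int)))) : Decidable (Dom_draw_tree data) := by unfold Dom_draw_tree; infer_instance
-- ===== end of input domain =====

-- B replaces A's two-phase strided placeholder-array fill by a single pass computing each
-- cell's round and game index in closed form from the cell number (objective: alternative).

-- ' ' * 35 * l  (Python string repetition; exact, empty for l ≤ 0)
def pvSpaces (l : Int) : String := String.ofList (List.replicate ((35 * l).toNat) ' ')

-- ===== PORT A =====
def draw_tree (data : List (List ((String × Int) × (String × Int)))) : List String :=
  let round_number := data.length
  -- the '' placeholders are modelled as `none`
  let tree0 : List (Option (((String × Int) × (String × Int)) × Int)) :=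
    List.replicate (2 ^ round_number - 1) none
  let filled :=
    ((PySem.List.enumerate data 0).foldl
      (fun (st : List (Option (((String × Int) × (String × Int)) × Int)) × Int) rp =>
        let inner :=
          (PySem.List.pyRange (st.2 - 1) ((st.1.length : Int)) (st.2 * 2)).foldl
            (fun (st2 : List (Option (((String × Int) × (String × Int)) × Int)) × Int) game =>
              -- tree[game] = (round_id[idx], rnum); a raising round_id[idx] stores `none` (excluded by Pre_)
              (PySem.List.pySetD st2.1 game
                ((PySem.List.pyGet? rp.2 st2.2).map (fun g => (g, rp.1))), st2.2 + 1))
            (st.1, (0 : Int))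
        (inner.1, st.2 * 2))
      (tree0, (1 : Int))).1
  filled.foldl
    (fun acc cell =>
      match cell with
      | some (g, rnum) =>
          let separ := pvSpaces rnum
          acc ++ [separ ++ g.1.1 ++ ": " ++ PySem.Int.toStr g.1.2 ++ " points" ++ "\n" ++
                  separ ++ g.2.1 ++ ": " ++ PySem.Int.toStr g.2.2 ++ " points"]
      | none => acc)  -- a leftover '' cell makes Python raise; unreachable (every cell is set)
    []

-- ===== PORT B =====
-- the while-loop  `while j % 2 == 0: j //= 2; l += 1`  (exact for j ≥ 1, the only calls made)
def pvTz (j l : Nat) : Nat × Nat :=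
  if h : j % 2 = 0 ∧ 0 < j then pvTz (j / 2) (l + 1) else (j, l)
termination_by j
decreasing_by exact Nat.div_lt_self h.2 (by omega)

def draw_tree_alt (data : List (List ((String × Int) × (String × Int)))) : List String :=
  let n := data.length
  (PySem.List.pyRange 1 (2 ^ n) 1).foldl
    (fun acc i =>
      let p := pvTz i.toNat 0   -- i ≥ 1 here, so .toNat is exact
      -- game = data[l][j // 2]; an IndexError is modelled as `none` (excluded by Pre_)
      match (PySem.List.pyGet? data ((p.2 : Int))).bind
              (fun r => PySem.List.pyGet? r ((p.1 / 2 : Nat) : Int)) with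
      | some game =>
          let separ := pvSpaces (p.2 : Int)
          acc ++ [separ ++ game.1.1 ++ ": " ++ PySem.Int.toStr game.1.2 ++ " points" ++ "\n" ++
                  separ ++ game.2.1 ++ ": " ++ PySem.Int.toStr game.2.2 ++ " points"]
      | none => acc)
    []

-- ===== PRECONDITION & SPEC =====
-- Pre_ = exactly the inputs on which Python A returns: round r must hold at least 2^(n-1-r)
-- games, otherwise round_id[idx] raises IndexError (B raises there too).
def Pre_draw_tree (data : List (List ((String × Int) × (String × Int)))) : Prop :=
  ∀ r ∈ List.range data.length, 2 ^ (data.length - 1 - r) ≤ (data.getD r []).length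
instance (data : List (List ((String × Int) × (String × Int)))) : Decidable (Pre_draw_tree data) := by
  unfold Pre_draw_tree; infer_instance

def pvWitness_draw_tree : (List (List ((String × Int) × (String × Int)))) :=
  [[(("a", 1), ("b", 2))]]

def Spec_draw_tree (data : List (List ((String × Int) × (String × Int)))) (out : List String) : Prop := out = draw_tree_alt data
instance (data : List (List ((String × Int) × (String × Int)))) (out : List String) : Decidable (Spec_draw_tree data out) := by unfold Spec_draw_tree; infer_instance

-- ===== CLAIM (what is proved, stated in full; the proofs are below) =====
def Claim_equal_draw_tree : Prop := ∀ (data : List (List ((String × Int) × (String × Int)))), Dom_draw_tree data → Pre_draw_tree data → Spec_draw_tree data (draw_tree data)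

-- ===== LEMMAS AND PROOFS =====

abbrev pvG : Type := (String × Int) × (String × Int)
abbrev pvC : Type := Option (pvG × Int)

-- the string both ports build for one cell
def pvFmt (g : pvG) (rnum : Int) : String :=
  pvSpaces rnum ++ g.1.1 ++ ": " ++ PySem.Int.toStr g.1.2 ++ " points" ++ "\n" ++
  pvSpaces rnum ++ g.2.1 ++ ": " ++ PySem.Int.toStr g.2.2 ++ " points"

-- the strings cell p (0-based tree index) contributes, via the closed form
def pvCell (data : List (List pvG)) (p : Nat) : List String :=
  match (PySem.List.pyGet? data (((pvTz (p + 1) 0).2 : Int))).bind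
          (fun r => PySem.List.pyGet? r (((pvTz (p + 1) 0).1 / 2 : Nat) : Int)) with
  | some g => [pvFmt g ((pvTz (p + 1) 0).2 : Int)]
  | none => []

-- the value A's fill loop stores at tree index p once round (pvTz (p+1) 0).2 is processed
def pvVal (data : List (List pvG)) (p : Nat) : pvC :=
  (PySem.List.pyGet? (data.getD (pvTz (p + 1) 0).2 []) (((pvTz (p + 1) 0).1 / 2 : Nat) : Int)).map
    (fun g => (g, ((pvTz (p + 1) 0).2 : Int)))

-- tree contents after the first s rounds have been filled in
def pvPart (data : List (List pvG)) (s p : Nat) : pvC :=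
  if (pvTz (p + 1) 0).2 < s then pvVal data p else none

-- what the read loop appends for one tree cell
def pvH (cell : pvC) : List String :=
  match cell with
  | some (g, rnum) => [pvFmt g rnum]
  | none => []

-- A's inner loop as a sequence of `set`s
def pvSetSeq (tr : List pvC) (q : Nat → Nat) (f : Nat → pvC) : Nat → List pvC
  | 0 => tr
  | t + 1 => (pvSetSeq tr q f t).set (q t) (f t)

theorem pvTz_of (j v l : Nat) (hj : j % 2 = 1) : pvTz (j * 2 ^ v) l = (j, l + v) := by
  induction v generalizing l with
  | zero => unfold pvTz; simp [hj]
  | succ v ih =>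
      have he : j * 2 ^ (v + 1) = 2 * (j * 2 ^ v) := by ring
      have hpos : 0 < j * 2 ^ v := by
        have h2v : 0 < 2 ^ v := Nat.two_pow_pos _
        exact Nat.mul_pos (by omega) h2v
      unfold pvTz
      rw [dif_pos (by omega)]
      have h2 : j * 2 ^ (v + 1) / 2 = j * 2 ^ v := by omega
      rw [h2, ih (l + 1)]
      simp [Nat.add_assoc, Nat.add_comm 1 v]

theorem pvTz_spec (m : Nat) (hm : 0 < m) :
    (pvTz m 0).1 % 2 = 1 ∧ m = (pvTz m 0).1 * 2 ^ (pvTz m 0).2 := by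
  obtain ⟨j, v, hj, rfl⟩ : ∃ j v, j % 2 = 1 ∧ m = j * 2 ^ v := by
    induction m using Nat.strong_induction_on with
    | _ m ih =>
      rcases Nat.even_or_odd m with he | ho
      · rw [Nat.even_iff] at he
        have h2 : 0 < m / 2 := by omega
        obtain ⟨j, v, hj, hm2⟩ := ih (m / 2) (by omega) h2
        refine ⟨j, v + 1, hj, ?_⟩
        have hr : j * 2 ^ (v + 1) = j * 2 ^ v * 2 := by ring
        omega
      · exact ⟨m, 0, Nat.odd_iff.mp ho, by simp⟩
  rw [pvTz_of j v 0 hj]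
  exact ⟨hj, by simp⟩

theorem pvSetSeq_length (tr : List pvC) (q : Nat → Nat) (f : Nat → pvC) (c : Nat) :
    (pvSetSeq tr q f c).length = tr.length := by
  induction c with
  | zero => rfl
  | succ c ih => simp [pvSetSeq, ih]

theorem pvSetSeq_get_hit (tr : List pvC) (q : Nat → Nat) (f : Nat → pvC) (c t : Nat)
    (ht : t < c) (hlt : q t < tr.length) (hinj : ∀ t', q t' = q t → t' = t) :
    (pvSetSeq tr q f c)[q t]? = some (f t) := by
  induction c with
  | zero => omega
  | succ c ih =>
      rcases Nat.lt_or_ge t c with h | h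
      · have hne : q c ≠ q t := fun he => by have := hinj c he; omega
        simp only [pvSetSeq]
        rw [List.getElem?_set_ne hne]
        exact ih h
      · have ht' : t = c := by omega
        subst ht'
        simp only [pvSetSeq]
        rw [List.getElem?_set_self (by rw [pvSetSeq_length]; exact hlt)]

theorem pvSetSeq_get_miss (tr : List pvC) (q : Nat → Nat) (f : Nat → pvC) (c p : Nat)
    (h : ∀ t < c, q t ≠ p) : (pvSetSeq tr q f c)[p]? = tr[p]? := by
  induction c with
  | zero => rfl
  | succ c ih =>
      simp only [pvSetSeq]
      rw [List.getElem?_set_ne (h c (by omega))]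
      exact ih (fun t ht => h t (by omega))

-- the inner fold, with its running index, is a pvSetSeq over the arithmetic progression
theorem pvFold_set_pair (K : Nat) (qI : Nat → Int) (f : Int → pvC) (tr : List pvC)
    (hq : ∀ t, 0 ≤ qI t) :
    ((List.range K).map qI).foldl
        (fun st2 game => (PySem.List.pySetD st2.1 game (f st2.2), st2.2 + 1)) (tr, (0 : Int))
      = (pvSetSeq tr (fun t => (qI t).toNat) (fun t => f (t : Int)) K, (K : Int)) := by
  induction K with
  | zero => rfl
  | succ K ih =>
      rw [List.range_succ, List.map_append, List.foldl_append, ih]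
      simp only [List.map_cons, List.map_nil, List.foldl_cons, List.foldl_nil, pvSetSeq]
      rw [PySem.List.pySetD_of_nonneg _ _ (hq K)]
      constructor

theorem pvInner_eq (tr : List pvC) (r n : Nat) (hr : r < n) (hlen : tr.length = 2 ^ n - 1)
    (f : Int → pvC) :
    (PySem.List.pyRange (((2 ^ r : Nat) : Int) - 1) ((tr.length : Int)) (((2 ^ r : Nat) : Int) * 2)).foldl
        (fun st2 game => (PySem.List.pySetD st2.1 game (f st2.2), st2.2 + 1)) (tr, (0 : Int))
      = (pvSetSeq tr (fun t => 2 ^ r - 1 + t * 2 ^ (r + 1)) (fun t => f (t : Int)) (2 ^ (n - 1 - r)),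
         ((2 ^ (n - 1 - r) : Nat) : Int)) := by
  have hceq : ((2 ^ r : Nat) : Int) = (2 : Int) ^ r := by push_cast; ring
  rw [hceq]
  have hrn : (2 : Nat) ^ r < 2 ^ n := Nat.pow_lt_pow_right (by norm_num) hr
  have hr1 : 0 < (2 : Nat) ^ r := Nat.two_pow_pos r
  have hn1 : 0 < (2 : Nat) ^ n := Nat.two_pow_pos n
  have hs : (0 : Int) < (2 ^ r : Int) * 2 := by positivity
  rw [hlen, PySem.List.pyRange_of_pos _ _ hs]
  have hKnum : ((2 ^ n - 1 : Nat) : Int) - ((2 : Int) ^ r - 1) + (2 : Int) ^ r * 2 - 1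
      = ((2 ^ n + 2 ^ r - 1 : Nat) : Int) := by
    push_cast [Nat.one_le_two_pow,
      (show (1 : Nat) ≤ 2 ^ n + 2 ^ r from le_trans Nat.one_le_two_pow (Nat.le_add_right _ _))]
    ring
  have hdivNat : (2 ^ n + 2 ^ r - 1) / 2 ^ (r + 1) = 2 ^ (n - 1 - r) := by
    have hsplit : (2 : Nat) ^ n = 2 ^ (r + 1) * 2 ^ (n - 1 - r) := by
      rw [← pow_add]; congr 1; omega
    have hlt : (2 : Nat) ^ r - 1 < 2 ^ (r + 1) := by
      have : (2 : Nat) ^ r < 2 ^ (r + 1) := Nat.pow_lt_pow_right (by norm_num) (by omega)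
      omega
    have : 2 ^ n + 2 ^ r - 1 = 2 ^ (r + 1) * 2 ^ (n - 1 - r) + (2 ^ r - 1) := by omega
    rw [this, Nat.mul_add_div (Nat.two_pow_pos _), Nat.div_eq_of_lt hlt]
    omega
  have hK : (if ((2 : Int) ^ r - 1) < ((2 ^ n - 1 : Nat) : Int) then
      ((((2 ^ n - 1 : Nat) : Int) - ((2 : Int) ^ r - 1) + (2 : Int) ^ r * 2 - 1) / ((2 : Int) ^ r * 2)).toNat
      else 0) = 2 ^ (n - 1 - r) := by
    rw [if_pos (by rw [← hceq]; omega), hKnum]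
    have h2 : ((2 : Int) ^ r * 2) = ((2 ^ (r + 1) : Nat) : Int) := by push_cast; ring
    rw [h2, ← Int.natCast_div, Int.toNat_natCast, hdivNat]
  rw [hK, pvFold_set_pair _ _ _ _ (fun t => by
    have h1 : (1 : Int) ≤ 2 ^ r := one_le_pow₀ (by norm_num)
    have h2 : (0 : Int) ≤ ((2 : Int) ^ r * 2) * (t : Int) := by positivity
    linarith)]
  have hqe : (fun t : Nat => (((2 : Int) ^ r - 1) + ((2 : Int) ^ r * 2) * (t : Int)).toNat)
      = (fun t : Nat => 2 ^ r - 1 + t * 2 ^ (r + 1)) := by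
    funext t
    have h2 : ((2 : Int) ^ r - 1) + ((2 : Int) ^ r * 2) * (t : Int)
        = ((2 ^ r - 1 + t * 2 ^ (r + 1) : Nat) : Int) := by
      push_cast [Nat.one_le_two_pow]; ring
    rw [h2, Int.toNat_natCast]
  rw [hqe]

-- the outer fold establishes pvPart at level n
theorem pvOuter_inv (data : List (List pvG)) :
    ∀ (k s : Nat) (tr : List pvC), s + k = data.length → tr.length = 2 ^ data.length - 1 →
      (∀ p, p < 2 ^ data.length - 1 → tr[p]? = some (pvPart data s p)) →
      (let res := (PySem.List.enumerate (data.drop s) (s : Int)).foldl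
          (fun (st : List pvC × Int) rp =>
            let inner :=
              (PySem.List.pyRange (st.2 - 1) ((st.1.length : Int)) (st.2 * 2)).foldl
                (fun (st2 : List pvC × Int) game =>
                  (PySem.List.pySetD st2.1 game
                    ((PySem.List.pyGet? rp.2 st2.2).map (fun g => (g, rp.1))), st2.2 + 1))
                (st.1, (0 : Int))
            (inner.1, st.2 * 2))
          (tr, ((2 ^ s : Nat) : Int))
       res.1.length = 2 ^ data.length - 1 ∧
         ∀ p, p < 2 ^ data.length - 1 → res.1[p]? = some (pvPart data data.length p)) := by
  intro k
  induction k with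
  | zero =>
      intro s tr hs hlen hinv
      have hsn : s = data.length := by omega
      subst hsn
      rw [List.drop_length, PySem.List.enumerate_nil, List.foldl_nil]
      exact ⟨hlen, hinv⟩
  | succ k ih =>
      intro s tr hs hlen hinv
      have hsl : s < data.length := by omega
      rw [List.drop_eq_getElem_cons hsl, PySem.List.enumerate_cons, List.foldl_cons]
      have hinner := pvInner_eq tr s data.length hsl hlen
        (fun idx => (PySem.List.pyGet? data[s] idx).map (fun g => (g, (s : Int))))
      simp only
      rw [hinner]
      simp only
      have hshift : ((2 ^ s : Nat) : Int) * 2 = ((2 ^ (s + 1) : Nat) : Int) := by push_cast; ring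
      rw [hshift]
      have hcast : (s : Int) + 1 = ((s + 1 : Nat) : Int) := by push_cast; ring
      rw [hcast]
      set cnt := 2 ^ (data.length - 1 - s) with hcnt
      set q : Nat → Nat := fun t => 2 ^ s - 1 + t * 2 ^ (s + 1) with hq
      set f' : Nat → pvC := fun t =>
        (PySem.List.pyGet? data[s] ((t : Nat) : Int)).map (fun g => (g, (s : Int))) with hf
      have hlen' : (pvSetSeq tr q f' cnt).length = 2 ^ data.length - 1 := by
        rw [pvSetSeq_length, hlen]
      refine ih (s + 1) (pvSetSeq tr q f' cnt) (by omega) hlen' ?_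
      intro p hp
      have hpos : 0 < p + 1 := by omega
      obtain ⟨hj, hm⟩ := pvTz_spec (p + 1) hpos
      set j := (pvTz (p + 1) 0).1 with hjdef
      set l := (pvTz (p + 1) 0).2 with hldef
      have hsplit : 2 ^ (data.length - 1 - s) * 2 ^ (s + 1) = 2 ^ data.length := by
        rw [← pow_add]; congr 1; omega
      have h2s : 0 < (2 : Nat) ^ s := Nat.two_pow_pos s
      have h2s1 : 0 < (2 : Nat) ^ (s + 1) := Nat.two_pow_pos (s + 1)
      have h2n : 0 < (2 : Nat) ^ data.length := Nat.two_pow_pos data.length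
      by_cases hl : l = s
      · -- this round fills cell p
        set k0 := j / 2 with hk0
        have hj2 : j = 2 * k0 + 1 := by omega
        have hlink : (2 * k0 + 1) * 2 ^ s = k0 * 2 ^ (s + 1) + 2 ^ s := by ring
        have hmS : p + 1 = j * 2 ^ s := by rw [← hl]; exact hm
        have hj2' : j * 2 ^ s = (2 * k0 + 1) * 2 ^ s := by rw [← hj2]
        have hm' : p + 1 = k0 * 2 ^ (s + 1) + 2 ^ s := by omega
        have hpq : q k0 = p := by simp only [hq]; omega
        have hk0cnt : k0 < cnt := by
          by_contra hge
          have : cnt * 2 ^ (s + 1) ≤ k0 * 2 ^ (s + 1) :=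
            Nat.mul_le_mul_right _ (by omega)
          rw [hcnt] at this
          rw [hsplit] at this
          omega
        have hinj : ∀ t', q t' = q k0 → t' = k0 := by
          intro t' he
          simp only [hq] at he
          have h1 : t' * 2 ^ (s + 1) = k0 * 2 ^ (s + 1) := by omega
          exact Nat.eq_of_mul_eq_mul_right h2s1 h1
        have hget := pvSetSeq_get_hit tr q f' cnt k0 hk0cnt (by rw [hlen]; omega) hinj
        rw [hpq] at hget
        rw [hget]
        simp only [pvPart, pvVal, ← hjdef, ← hldef, hl, ← hk0, hf,
          List.getD_eq_getElem data [] hsl]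
        simp
      · -- cell p is untouched in this round
        have hmiss : ∀ t < cnt, q t ≠ p := by
          intro t ht he
          have hlink : (2 * t + 1) * 2 ^ s = t * 2 ^ (s + 1) + 2 ^ s := by ring
          have hm2 : p + 1 = (2 * t + 1) * 2 ^ s := by
            simp only [hq] at he; omega
          have := pvTz_of (2 * t + 1) s 0 (by omega)
          have hTz : pvTz (p + 1) 0 = (2 * t + 1, s) := by rw [hm2]; simpa using this
          exact hl (by rw [hldef, hTz])
        rw [pvSetSeq_get_miss tr q f' cnt p hmiss, hinv p hp]
        simp only [pvPart, ← hldef]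
        by_cases hlt : l < s
        · rw [if_pos hlt, if_pos (by omega)]
        · rw [if_neg hlt, if_neg (by omega)]

theorem pvLvl_lt (n p : Nat) (hp : p < 2 ^ n - 1) : (pvTz (p + 1) 0).2 < n := by
  obtain ⟨hj, hm⟩ := pvTz_spec (p + 1) (by omega)
  have h1 : 2 ^ (pvTz (p + 1) 0).2 ≤ p + 1 := by
    conv_rhs => rw [hm]
    exact Nat.le_mul_of_pos_left _ (by omega)
  have h2 : 0 < (2 : Nat) ^ n := Nat.two_pow_pos n
  have h3 : (2 : Nat) ^ (pvTz (p + 1) 0).2 < 2 ^ n := lt_of_le_of_lt h1 (by omega)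
  exact (Nat.pow_lt_pow_iff_right (by norm_num)).mp h3

theorem pvFlatMap_congr {α β : Type} (l : List α) (f g : α → List β)
    (h : ∀ x ∈ l, f x = g x) : l.flatMap f = l.flatMap g := by
  induction l with
  | nil => rfl
  | cons x xs ih =>
      simp only [List.flatMap_cons, h x (by simp), ih (fun y hy => h y (by simp [hy]))]

theorem pvFold_app {α : Type} (h : α → List String) (F : List String → α → List String)
    (l : List α) (hF : ∀ acc c, c ∈ l → F acc c = acc ++ h c) (acc : List String) :
    l.foldl F acc = acc ++ l.flatMap h := by
  induction l generalizing acc with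
  | nil => simp
  | cons c cs ih =>
      rw [List.foldl_cons, hF acc c (by simp), ih (fun a c' hc' => hF a c' (by simp [hc'])),
        List.flatMap_cons, List.append_assoc]

theorem pvA_eq (data : List (List pvG)) :
    draw_tree data = (List.range (2 ^ data.length - 1)).flatMap (fun p => pvH (pvVal data p)) := by
  have hbase : ∀ p, p < 2 ^ data.length - 1 →
      (List.replicate (2 ^ data.length - 1) (none : pvC))[p]? = some (pvPart data 0 p) := by
    intro p hp
    rw [List.getElem?_replicate, if_pos hp]
    simp [pvPart]
  have hO := pvOuter_inv data data.length 0 (List.replicate (2 ^ data.length - 1) none)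
    (by omega) (by simp) hbase
  simp only [List.drop_zero, Nat.cast_zero] at hO
  have h20 : ((2 ^ 0 : Nat) : Int) = 1 := by norm_num
  rw [h20] at hO
  obtain ⟨hlen, hget⟩ := hO
  unfold draw_tree
  simp only
  refine (pvFold_app pvH _ _ ?_ _).trans ?_
  · intro acc c _
    match c with
    | none => simp [pvH]
    | some (g, rnum) => rfl
  · have hfill : (List.foldl
        (fun (st : List pvC × Int) (rp : Int × List pvG) =>
          ((List.foldl
              (fun (st2 : List pvC × Int) game =>
                (PySem.List.pySetD st2.1 game
                  (Option.map (fun g => (g, rp.1)) (PySem.List.pyGet? rp.2 st2.2)), st2.2 + 1))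
              (st.1, 0) (PySem.List.pyRange (st.2 - 1) (↑st.1.length) (st.2 * 2))).1,
            st.2 * 2))
        (List.replicate (2 ^ data.length - 1) none, 1)
        (PySem.List.enumerate data 0)).1
        = (List.range (2 ^ data.length - 1)).map (fun p => pvPart data data.length p) := by
      apply List.ext_getElem?
      intro i
      rcases Nat.lt_or_ge i (2 ^ data.length - 1) with hi | hi
      · rw [hget i hi, List.getElem?_map, List.getElem?_range hi]; rfl
      · rw [List.getElem?_eq_none (by omega), List.getElem?_eq_none (by simp; omega)]
    rw [hfill, List.flatMap_map]
    simp only [List.nil_append]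
    apply pvFlatMap_congr
    intro p hp
    have hpn : p < 2 ^ data.length - 1 := by simpa using hp
    simp only [pvPart, if_pos (pvLvl_lt data.length p hpn)]

theorem pvB_eq (data : List (List pvG)) :
    draw_tree_alt data = (List.range (2 ^ data.length - 1)).flatMap (fun p => pvCell data p) := by
  unfold draw_tree_alt
  simp only
  refine (pvFold_app (fun i : Int => pvCell data (i.toNat - 1)) _ _ ?_ _).trans ?_
  · intro acc i hi
    have h1i : 1 ≤ i := (PySem.List.mem_pyRange_one.mp hi).1
    have hiN : i.toNat - 1 + 1 = i.toNat := by omega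
    simp only [pvCell, hiN]
    cases hd : (PySem.List.pyGet? data (((pvTz i.toNat 0).2 : Nat) : Int)).bind
        (fun r => PySem.List.pyGet? r (((pvTz i.toNat 0).1 / 2 : Nat) : Int)) with
    | none => simp
    | some game => simp [pvFmt]
  · rw [PySem.List.pyRange_one 1 (2 ^ data.length), List.flatMap_map]
    have hc : ((2 ^ data.length : Nat) : Int) = (2 : Int) ^ data.length := by push_cast; ring
    have ht : ((2 : Int) ^ data.length - 1).toNat = 2 ^ data.length - 1 := by omega
    rw [ht]
    simp only [List.nil_append]
    apply pvFlatMap_congr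
    intro k _
    have hk : ((1 : Int) + (k : Nat)).toNat - 1 = k := by omega
    rw [hk]

theorem pvCell_eq_H (data : List (List pvG)) (p : Nat) (hp : p < 2 ^ data.length - 1) :
    pvH (pvVal data p) = pvCell data p := by
  have hl : (pvTz (p + 1) 0).2 < data.length := pvLvl_lt data.length p hp
  have h1 : PySem.List.pyGet? data (((pvTz (p + 1) 0).2 : Nat) : Int) = some data[(pvTz (p + 1) 0).2] := by
    rw [PySem.List.pyGet?_natCast]
    exact List.getElem?_eq_getElem hl
  have h2 : data.getD (pvTz (p + 1) 0).2 [] = data[(pvTz (p + 1) 0).2] :=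
    List.getD_eq_getElem data [] hl
  simp only [pvCell, pvVal, pvH, h1, h2, Option.bind_some]
  cases hd : PySem.List.pyGet? data[(pvTz (p + 1) 0).2]
      (((pvTz (p + 1) 0).1 / 2 : Nat) : Int) with
  | none => simp
  | some g => simp

-- ===== VERDICT (by name: the statement is the Claim_ definition above) =====
theorem draw_tree_spec : Claim_equal_draw_tree := by
  intro data _hdom _hpre
  unfold Spec_draw_tree
  rw [pvA_eq, pvB_eq]
  exact pvFlatMap_congr _ _ _ (fun p hp => pvCell_eq_H data p (by simpa using hp))
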